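-- pv_equiv track=rewrite | github.com/wurmhul/NUCSProjects | DecryptPasswords.py | scramble2Decrypt
-- ===== SOURCE A (Python) =====
-- def scramble2Decrypt(cipherText):
--   """Decrypts a ciphertext using the scramble2Encrypt function.
--
--   Args:
--     cipherText: The ciphertext to decrypt.
--
--   Returns:
--     The decrypted text.
--   """
--
--   # Check if the ciphertext is empty.
--   if not cipherText:
--     return ""
--
--   # Get the length of the ciphertext.
--   cipherTextLength = len(cipherText)
--
--   # Get the half-length of the ciphertext.
--   halfLength = cipherTextLength // 2
--
--   # Get the even characters of the ciphertext.
--   evenChars = cipherText[:halfLength]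
--
--   # Get the odd characters of the ciphertext.
--   oddChars = cipherText[halfLength:]
--
--   # Initialize the plaintext variable.
--   plainText = ""
--
--   # Iterate over the even and odd characters, alternating between them.
--   for i in range(halfLength):
--     plainText += evenChars[i]
--     plainText += oddChars[i]
--
--   # If there are more even characters than odd characters, append the last even character to the plaintext.
--   if len(evenChars) > len(oddChars):
--     plainText += evenChars[-1]
--
--   # Return the plaintext.
--   return plainText
-- ===== SOURCE B (Python) =====
-- def scramble2Decrypt(cipherText):
--   """Decrypts by computing each output character directly from its position:
--   output position i takes cipherText[i//2] when i is even and
--   cipherText[half + i//2] when i is odd (one closed-form index per position).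
--   """
--   half = len(cipherText) // 2
--   return ''.join(cipherText[i // 2 + (i % 2) * half] for i in range(2 * half))
-- ===== Notes on version B (the rewrite author's own statement) =====
-- stated objective: alternative
-- what changed: Instead of splitting into two halves and looping over pair positions with a growing string accumulator (plus a dead trailing-char branch), B is output-position driven: it computes each output character directly by the closed-form index i//2 + (i%2)*half over range(2*half) and joins them.
import Mathlib
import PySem

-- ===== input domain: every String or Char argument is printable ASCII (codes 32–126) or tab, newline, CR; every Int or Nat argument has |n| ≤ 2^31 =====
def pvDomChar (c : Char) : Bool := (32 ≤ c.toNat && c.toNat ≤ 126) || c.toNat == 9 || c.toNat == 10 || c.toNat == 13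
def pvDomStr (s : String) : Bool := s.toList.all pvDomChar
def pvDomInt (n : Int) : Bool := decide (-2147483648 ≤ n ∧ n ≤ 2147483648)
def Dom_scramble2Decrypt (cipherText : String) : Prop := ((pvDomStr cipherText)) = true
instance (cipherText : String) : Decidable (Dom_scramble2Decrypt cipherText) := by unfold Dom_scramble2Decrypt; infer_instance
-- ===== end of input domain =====

-- B replaces A's half-splitting pair loop (string accumulator + dead trailing-char branch) by an
-- output-position-driven construction: each output char is fetched by the closed-form index
-- i//2 + (i%2)*half; same return value on every input.

-- ===== PORT A =====
-- literal transliteration of A, on List Char (String.toList / String.ofList at the boundary)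
def scramble2DecryptCore (cs : List Char) : List Char :=
  if cs = [] then []
  else
    let cipherTextLength : Int := cs.length
    let halfLength : Int := PySem.Int.floordiv cipherTextLength 2
    let evenChars := PySem.List.slice cs none (some halfLength)
    let oddChars := PySem.List.slice cs (some halfLength) none
    let plainText := (PySem.List.pyRange 0 halfLength 1).foldl
      (fun acc i => acc ++ [PySem.List.pyGetD evenChars i ' '] ++ [PySem.List.pyGetD oddChars i ' ']) []
    if oddChars.length < evenChars.length then
      plainText ++ [PySem.List.pyGetD evenChars (-1) ' ']
    else plainText

def scramble2Decrypt (cipherText : String) : String :=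
  String.ofList (scramble2DecryptCore cipherText.toList)

-- ===== PORT B =====
def scramble2Decrypt_alt (cipherText : String) : String :=
  let cs := cipherText.toList
  let half : Int := PySem.Int.floordiv (cs.length : Int) 2
  String.ofList ((PySem.List.pyRange 0 (2 * half) 1).map
    (fun i => PySem.List.pyGetD cs (PySem.Int.floordiv i 2 + PySem.Int.mod i 2 * half) ' '))

-- ===== PRECONDITION & SPEC =====
def Spec_scramble2Decrypt (cipherText : String) (out : String) : Prop := out = scramble2Decrypt_alt cipherText
instance (cipherText : String) (out : String) : Decidable (Spec_scramble2Decrypt cipherText out) := by unfold Spec_scramble2Decrypt; infer_instance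

-- ===== CLAIM (what is proved, stated in full; the proofs are below) =====
def Claim_equal_scramble2Decrypt : Prop := ∀ (cipherText : String), Dom_scramble2Decrypt cipherText → Spec_scramble2Decrypt cipherText (scramble2Decrypt cipherText)

-- ===== LEMMAS AND PROOFS =====

-- zip ignores the part of the right list beyond the left list's length
lemma zip_take_right (xs ys : List Char) (n : Nat) (h : xs.length ≤ n) :
    xs.zip (ys.take n) = xs.zip ys := by
  induction xs generalizing ys n with
  | nil => simp
  | cons x xs ih =>
    cases ys with
    | nil => simp
    | cons y ys =>
      cases n with
      | zero => simp at h
      | succ m => simp only [List.take_succ_cons, List.zip_cons_cons]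
                  rw [ih ys m (by simp at h; omega)]

-- A's loop over range(m) interleaves the first m characters of xs and ys.
lemma interleave_fold (xs ys : List Char) (m : Nat) (h1 : m ≤ xs.length) (h2 : m ≤ ys.length)
    (acc : List Char) :
    (PySem.List.pyRange 0 (m : Int) 1).foldl
      (fun a i => a ++ [PySem.List.pyGetD xs i ' '] ++ [PySem.List.pyGetD ys i ' ']) acc
    = acc ++ ((xs.take m).zip (ys.take m)).flatMap (fun p => [p.1, p.2]) := by
  induction m generalizing acc with
  | zero => simp [PySem.List.pyRange_one_eq_nil]
  | succ k ih =>
    have hk1 : k ≤ xs.length := by omega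
    have hk2 : k ≤ ys.length := by omega
    have hcast : ((k + 1 : Nat) : Int) = (k : Int) + 1 := by push_cast; ring
    rw [hcast, PySem.List.pyRange_one_succ_right (by positivity), List.foldl_append,
      ih hk1 hk2]
    simp only [List.foldl_cons, List.foldl_nil, PySem.List.pyGetD_natCast]
    have hx : xs.take (k + 1) = xs.take k ++ [xs[k]] := by
      rw [List.take_add_one]; simp [List.getElem?_eq_getElem (by omega : k < xs.length)]
    have hy : ys.take (k + 1) = ys.take k ++ [ys[k]] := by
      rw [List.take_add_one]; simp [List.getElem?_eq_getElem (by omega : k < ys.length)]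
    rw [hx, hy, List.zip_append (by simp [hk1, hk2])]
    simp only [List.getD_eq_getElem?_getD, List.getElem?_eq_getElem (by omega : k < xs.length),
      List.getElem?_eq_getElem (by omega : k < ys.length)]
    all_goals simp
    all_goals exact ⟨rfl, rfl⟩

-- A's core equals the interleaving of the two halves (zip-flatMap canonical form).
lemma core_eq (cs : List Char) :
    scramble2DecryptCore cs
      = ((cs.take (cs.length / 2)).zip (cs.drop (cs.length / 2))).flatMap (fun p => [p.1, p.2]) := by
  by_cases hnil : cs = []
  · subst hnil; simp [scramble2DecryptCore]
  · unfold scramble2DecryptCore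
    rw [if_neg hnil]
    have hhalf : PySem.Int.floordiv (cs.length : Int) 2 = ((cs.length / 2 : Nat) : Int) := by
      exact_mod_cast PySem.Int.floordiv_natCast cs.length 2
    set h := cs.length / 2 with hh
    have hle : h ≤ cs.length := Nat.div_le_self _ _
    simp only [hhalf, PySem.List.slice_to_natCast, PySem.List.slice_from_natCast]
    have hlen1 : (cs.take h).length = h := by simp [hle]
    have hlen2 : (cs.drop h).length = cs.length - h := by simp
    have hcond : ¬ ((cs.drop h).length < (cs.take h).length) := by
      rw [hlen1, hlen2]; omega
    rw [if_neg hcond]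
    rw [interleave_fold (cs.take h) (cs.drop h) h (by omega) (by omega) []]
    have : (cs.take h).take h = cs.take h := List.take_of_length_le (by omega)
    rw [this]
    rw [zip_take_right _ _ _ (by simp), List.nil_append]

-- B's map over range(2*k) with the closed-form index builds the same interleaving, k pairs at a time.
lemma alt_map (cs : List Char) (h k : Nat) (hk : k ≤ h) (hh : 2 * h ≤ cs.length) :
    (PySem.List.pyRange 0 (2 * (k : Int)) 1).map
      (fun i => PySem.List.pyGetD cs (PySem.Int.floordiv i 2 + PySem.Int.mod i 2 * (h : Int)) ' ')
    = ((cs.take k).zip ((cs.drop h).take k)).flatMap (fun p => [p.1, p.2]) := by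
  induction k with
  | zero => simp [PySem.List.pyRange_one_eq_nil]
  | succ k ih =>
    have hk' : k ≤ h := by omega
    have hklt : k < cs.length := by omega
    have hhk : h + k < cs.length := by omega
    have hstep : (2 : Int) * ((k : Nat) + 1 : Nat) = ((2 * (k : Int)) + 1) + 1 := by push_cast; ring
    rw [hstep, PySem.List.pyRange_one_succ_right (by positivity),
        PySem.List.pyRange_one_succ_right (by positivity),
        List.map_append, List.map_append, ih hk']
    have e1 : (2 : Int) * (k : Int) = ((2 * k : Nat) : Int) := by push_cast; ring
    have e2 : ((2 * k : Nat) : Int) + 1 = ((2 * k + 1 : Nat) : Int) := by push_cast; ring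
    have n1 : 2 * k / 2 = k := by omega
    have n2 : 2 * k % 2 = 0 := by omega
    have n3 : (2 * k + 1) / 2 = k := by omega
    have n4 : (2 * k + 1) % 2 = 1 := by omega
    have f1 : PySem.Int.floordiv ((2 * k : Nat) : Int) 2 + PySem.Int.mod ((2 * k : Nat) : Int) 2 * (h : Int) = ((k : Nat) : Int) := by
      rw [show ((2 : Int) = ((2 : Nat) : Int)) from rfl, PySem.Int.floordiv_natCast, PySem.Int.mod_natCast, n1, n2]
      simp
    have f2 : PySem.Int.floordiv ((2 * k + 1 : Nat) : Int) 2 + PySem.Int.mod ((2 * k + 1 : Nat) : Int) 2 * (h : Int) = ((h + k : Nat) : Int) := by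
      rw [show ((2 : Int) = ((2 : Nat) : Int)) from rfl, PySem.Int.floordiv_natCast, PySem.Int.mod_natCast, n3, n4]
      push_cast; ring
    simp only [List.map_cons, List.map_nil, e1, e2, f1, f2, PySem.List.pyGetD_natCast]
    have hx : cs.take (k + 1) = cs.take k ++ [cs[k]] := by
      rw [List.take_add_one]; simp [List.getElem?_eq_getElem hklt]
    have hdk : k < (cs.drop h).length := by simp; omega
    have hy : (cs.drop h).take (k + 1) = (cs.drop h).take k ++ [(cs.drop h)[k]] := by
      rw [List.take_add_one]; simp [List.getElem?_eq_getElem hdk]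
    rw [hx, hy, List.zip_append (by simp; omega)]
    have hdg : (cs.drop h)[k] = cs[h + k] := by
      rw [List.getElem_drop]
    simp [hdg, List.getD_eq_getElem?_getD, List.getElem?_eq_getElem hklt,
      List.getElem?_eq_getElem hhk]

-- ===== VERDICT (by name: the statement is the Claim_ definition above) =====
theorem scramble2Decrypt_spec : Claim_equal_scramble2Decrypt := by
  intro s _
  unfold Spec_scramble2Decrypt scramble2Decrypt scramble2Decrypt_alt
  rw [core_eq]
  set cs := s.toList
  have hhalf : PySem.Int.floordiv (cs.length : Int) 2 = ((cs.length / 2 : Nat) : Int) := by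
    exact_mod_cast PySem.Int.floordiv_natCast cs.length 2
  set h := cs.length / 2 with hh
  simp only [hhalf]
  rw [alt_map cs h h le_rfl (by omega)]
  congr 1
  rw [zip_take_right _ _ _ (by simp)]
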